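-- pv_equiv track=rewrite | github.com/saraschandra-ajjarapu/python_interview_task | puzzle.py | HorizontalScan
-- ===== SOURCE A (Python) =====
-- def HorizontalScan(puzzle, term): # we scan horizantally from left to right
--     y = 0
--     for row in puzzle:
--         index = Index(row, term[0]) # index is first occurence of first character of the term
--         offset = 0  # windowing offset for where we already searched
--         while index is not None:
--             x = index+offset
--             possible_term = row[x:x+len(term)] # possible term is where we found first matching character ending at the expected length of the term
--             if possible_term == list(term):
--                 return (x,y)
--             offset = x+1
--             index = Index(row[offset:], term[0])
--         y = y+1
--
-- def Index(array, char): # we are catching it in a try catch in case the character was not found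
--     try:
--         index = array.index(char)
--         return index
--     except ValueError:
--         return
-- ===== SOURCE B (Python) =====
-- def HorizontalScan(puzzle, term):
--     # plain leftmost sliding-window scan, row by row, suffix by suffix
--     t = list(term)
--     n = len(t)
--     for y, row in enumerate(puzzle):
--         r = row
--         x = 0
--         while n <= len(r):
--             if r[:n] == t:
--                 return (x, y)
--             r = r[1:]
--             x += 1
--     return None
-- ===== Notes on version B (the rewrite author's own statement) =====
-- stated objective: simpler
-- what changed: Replaced A's first-character index-jumping with try/except and an offset window by a plain leftmost sliding-window scan that walks each row suffix by suffix and stops when the window no longer fits.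
-- crash fix: A raises IndexError on term[0] whenever term is the empty string and the puzzle has at least one row; B returns (0, 0) there (the empty term matches immediately). — e.g. on HorizontalScan([["a"]], ""): A raises IndexError, B returns some (0, 0)
import Mathlib
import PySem

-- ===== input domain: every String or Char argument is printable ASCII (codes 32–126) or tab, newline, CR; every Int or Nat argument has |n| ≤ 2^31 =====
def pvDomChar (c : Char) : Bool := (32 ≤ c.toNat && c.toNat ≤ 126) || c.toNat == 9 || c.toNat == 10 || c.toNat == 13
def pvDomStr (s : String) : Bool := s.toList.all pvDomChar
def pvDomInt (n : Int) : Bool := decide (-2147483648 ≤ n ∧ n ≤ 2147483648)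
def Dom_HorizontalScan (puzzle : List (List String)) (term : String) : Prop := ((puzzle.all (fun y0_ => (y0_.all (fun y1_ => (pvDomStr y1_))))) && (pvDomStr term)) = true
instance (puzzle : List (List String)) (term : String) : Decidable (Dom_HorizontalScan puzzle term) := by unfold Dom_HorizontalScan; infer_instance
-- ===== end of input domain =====

-- B replaces A's first-character index-jumping (try/except + offset window) by a plain
-- leftmost sliding-window scan, suffix by suffix — simpler, same result on Pre_.

-- ===== PORT A =====
-- helper 'Index' of A: array.index(char) returning None on ValueError
def pvIndexA (array : List String) (c : String) : Option Nat :=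
  PySem.List.index? array c

-- A's inner while-loop over 'offset'; invariant: index = Index(row[offset:], term[0]).
def pvAInner (row : List String) (tl : List String) (c : String) (offset : Nat) : Option Nat :=
  match h : pvIndexA (row.drop offset) c with
  | none => none
  | some i =>
    let x := i + offset
    if PySem.List.slice row (some ((x : Int))) (some ((x : Int) + (tl.length : Int))) = tl
    then some x
    else pvAInner row tl c (x + 1)
termination_by row.length - offset
decreasing_by
  have : i < (row.drop offset).length := by
    unfold pvIndexA at h
    obtain ⟨pre, suf, he, hl, -⟩ := (PySem.List.index?_eq_some_iff _ _ _).mp h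
    simp [he, ← hl]
  simp [List.length_drop] at this
  omega

-- A's outer for-loop over rows (y counter); term[0] raises when term = "" (excluded by Pre_).
def pvARows (puzzle : List (List String)) (term : String) (y : Int) : Option (Int × Int) :=
  match puzzle with
  | [] => none
  | row :: rest =>
    match PySem.Str.pyGet? term 0 with
    | none => none   -- Python raises IndexError here; outside Pre_
    | some c0 =>
      match pvAInner row (term.toList.map (fun ch => String.ofList [ch])) (String.ofList [c0]) 0 with
      | some x => some ((x : Int), y)
      | none => pvARows rest term (y + 1)

def HorizontalScan (puzzle : List (List String)) (term : String) : Option (Int × Int) :=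
  pvARows puzzle term 0

-- ===== PORT B =====
-- B's inner while-loop: walk the row suffix by suffix while the window still fits.
def pvBRow (r : List String) (tl : List String) (x : Nat) : Option Nat :=
  if tl.length ≤ r.length then
    if r.take tl.length = tl then some x
    else
      match r with
      | [] => none
      | _ :: rs => pvBRow rs tl (x + 1)
  else none

def pvBRows (puzzle : List (List String)) (tl : List String) (y : Int) : Option (Int × Int) :=
  match puzzle with
  | [] => none
  | row :: rest =>
    match pvBRow row tl 0 with
    | some x => some ((x : Int), y)
    | none => pvBRows rest tl (y + 1)

def HorizontalScan_alt (puzzle : List (List String)) (term : String) : Option (Int × Int) :=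
  pvBRows puzzle (term.toList.map (fun ch => String.ofList [ch])) 0

-- ===== PRECONDITION & SPEC =====
-- Pre_ excludes only the inputs where A raises IndexError (empty term with at least one row).
def Pre_HorizontalScan (puzzle : List (List String)) (term : String) : Prop :=
  puzzle = [] ∨ term ≠ ""
instance (puzzle : List (List String)) (term : String) : Decidable (Pre_HorizontalScan puzzle term) := by unfold Pre_HorizontalScan; infer_instance

def pvWitness_HorizontalScan : List (List String) × String := ([["c", "a", "t"]], "at")

-- A raises IndexError on term[0] whenever term = "" and the puzzle has a row; B returns (0, 0).
def Raises_HorizontalScan (puzzle : List (List String)) (term : String) : Prop :=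
  puzzle ≠ [] ∧ term = ""
instance (puzzle : List (List String)) (term : String) : Decidable (Raises_HorizontalScan puzzle term) := by unfold Raises_HorizontalScan; infer_instance
def pvRaiseWitness_HorizontalScan : List (List String) × String := ([["a"]], "")
def pvRaiseWitnessOut_HorizontalScan : Option (Int × Int) := some (0, 0)

def Spec_HorizontalScan (puzzle : List (List String)) (term : String) (out : Option (Int × Int)) : Prop := out = HorizontalScan_alt puzzle term
instance (puzzle : List (List String)) (term : String) (out : Option (Int × Int)) : Decidable (Spec_HorizontalScan puzzle term out) := by unfold Spec_HorizontalScan; infer_instance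

-- ===== CLAIM (what is proved, stated in full; the proofs are below) =====
def Claim_equal_HorizontalScan : Prop := ∀ (puzzle : List (List String)) (term : String), Dom_HorizontalScan puzzle term → Pre_HorizontalScan puzzle term → Spec_HorizontalScan puzzle term (HorizontalScan puzzle term)

def Claim_raises_HorizontalScan : Prop := (∀ (puzzle : List (List String)) (term : String), Dom_HorizontalScan puzzle term → Raises_HorizontalScan puzzle term → ¬ Pre_HorizontalScan puzzle term) ∧ (Dom_HorizontalScan (pvRaiseWitness_HorizontalScan.1) (pvRaiseWitness_HorizontalScan.2) ∧ Raises_HorizontalScan (pvRaiseWitness_HorizontalScan.1) (pvRaiseWitness_HorizontalScan.2) ∧ HorizontalScan_alt (pvRaiseWitness_HorizontalScan.1) (pvRaiseWitness_HorizontalScan.2) = pvRaiseWitnessOut_HorizontalScan)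

-- ===== LEMMAS AND PROOFS =====

-- If the window can never fit again, A's inner loop returns none.
theorem pvAInner_none_of_short (row tl : List String) (c : String) (offset : Nat) :
    row.length < tl.length + offset → pvAInner row tl c offset = none := by
  fun_induction pvAInner row tl c offset with
  | case1 => intro _; rfl
  | case2 offset i h x hslice =>
    intro hlt
    exfalso
    unfold pvIndexA at h
    obtain ⟨pre, suf, hs, hl, -⟩ := (PySem.List.index?_eq_some_iff _ _ _).mp h
    have hi : i < (row.drop offset).length := by rw [hs, ← hl]; simp
    have hx : i + offset = x := rfl
    rw [PySem.List.slice_natCast_add] at hslice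
    have := congrArg List.length hslice
    simp [List.length_take, List.length_drop] at this hi
    omega
  | case3 offset i h x hslice ih =>
    intro hlt
    exact ih (by omega)

-- B skips a block containing no occurrence of the head character.
theorem pvBRow_skip (pre rest tl : List String) (c : String) (x : Nat)
    (hc : c ∉ pre) (hh : tl.head? = some c) :
    pvBRow (pre ++ rest) tl x = pvBRow rest tl (x + pre.length) := by
  induction pre generalizing x with
  | nil => simp
  | cons p pre' ih =>
    obtain ⟨tl', rfl⟩ : ∃ tl', tl = c :: tl' := by
      cases tl with
      | nil => simp at hh
      | cons a b => simp at hh; exact ⟨b, by rw [hh]⟩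
    have hp : p ≠ c := fun h => hc (by simp [h])
    have hc' : c ∉ pre' := fun h => hc (by simp [h])
    rw [List.cons_append, pvBRow.eq_def]
    by_cases hlen : (c :: tl').length ≤ (p :: (pre' ++ rest)).length
    · rw [if_pos hlen]
      have htk : ¬ (p :: (pre' ++ rest)).take (c :: tl').length = c :: tl' := by
        simp [List.take_succ_cons]
        intro he _; exact hp he
      rw [if_neg htk]
      show pvBRow (pre' ++ rest) (c :: tl') (x + 1) = _
      rw [ih (x + 1) hc']
      congr 1
      simp; omega
    · rw [if_neg hlen]
      rw [pvBRow.eq_def]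
      have hr : ¬ (c :: tl').length ≤ rest.length := by
        simp at hlen ⊢; omega
      rw [if_neg hr]

-- Row-level equivalence of the two inner loops.
theorem pvInner_eq (row tl : List String) (c : String) (offset : Nat)
    (hh : tl.head? = some c) :
    pvAInner row tl c offset = pvBRow (row.drop offset) tl offset := by
  have htl : tl ≠ [] := by cases tl <;> simp_all
  fun_induction pvAInner row tl c offset with
  | case1 offset h =>
    unfold pvIndexA at h
    have hmem : c ∉ row.drop offset := by rw [PySem.List.index?_eq_none_iff] at h; exact h
    rw [show row.drop offset = row.drop offset ++ [] by simp,
        pvBRow_skip _ _ _ _ _ hmem hh, pvBRow.eq_def]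
    rw [if_neg (by simp [List.length_eq_zero_iff]; exact htl)]
  | case2 offset i h x hslice =>
    unfold pvIndexA at h
    obtain ⟨pre, suf, hs, hl, hcp⟩ := (PySem.List.index?_eq_some_iff _ _ _).mp h
    have hx : x = i + offset := rfl
    have hdx : row.drop x = c :: suf := by
      rw [hx, Nat.add_comm, ← List.drop_drop, hs, ← hl, List.drop_left]
    rw [PySem.List.slice_natCast_add, hdx] at hslice
    have hlen : tl.length ≤ (c :: suf).length := by
      have h2 := congrArg List.length hslice
      simp only [List.length_take] at h2
      rw [← h2]; exact min_le_right _ _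
    rw [hs, pvBRow_skip _ _ _ _ _ hcp hh, hl, pvBRow.eq_def,
        if_pos hlen, if_pos hslice]
    simp [hx]; omega
  | case3 offset i h x hslice ih =>
    unfold pvIndexA at h
    obtain ⟨pre, suf, hs, hl, hcp⟩ := (PySem.List.index?_eq_some_iff _ _ _).mp h
    have hx : x = i + offset := rfl
    have hdx : row.drop x = c :: suf := by
      rw [hx, Nat.add_comm, ← List.drop_drop, hs, ← hl, List.drop_left]
    rw [PySem.List.slice_natCast_add, hdx] at hslice
    rw [hs, pvBRow_skip _ _ _ _ _ hcp hh, hl, pvBRow.eq_def]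
    by_cases hlen : tl.length ≤ (c :: suf).length
    · rw [if_pos hlen, if_neg hslice]
      show pvAInner row tl c (x + 1) = pvBRow suf tl (offset + i + 1)
      rw [ih]
      congr 1
      · have := congrArg List.tail hdx
        simpa [List.tail_drop] using this
      · omega
    · rw [if_neg hlen]
      apply pvAInner_none_of_short
      have h1 := congrArg List.length hs
      simp [List.length_drop] at h1 hlen
      omega

theorem pvRows_eq (puzzle : List (List String)) (term : String) (hne : term ≠ "") (y : Int) :
    pvARows puzzle term y = pvBRows puzzle (term.toList.map (fun ch => String.ofList [ch])) y := by
  induction puzzle generalizing y with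
  | nil => rfl
  | cons row rest ih =>
    obtain ⟨c0, cs, hterm⟩ : ∃ c0 cs, term.toList = c0 :: cs := by
      cases h : term.toList with
      | nil => exact absurd (by simpa using congrArg String.ofList h) hne
      | cons a b => exact ⟨a, b, rfl⟩
    have hget : PySem.Str.pyGet? term 0 = some c0 := by
      simp [PySem.Str.pyGet?_eq, hterm]
    have hhead : (term.toList.map (fun ch => String.ofList [ch])).head? = some (String.ofList [c0]) := by
      simp [hterm]
    rw [pvARows, pvBRows, hget]
    show (match pvAInner row (term.toList.map (fun ch => String.ofList [ch])) (String.ofList [c0]) 0 with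
          | some x => some ((x : Int), y)
          | none => pvARows rest term (y + 1)) = _
    rw [pvInner_eq row _ _ 0 hhead, List.drop_zero]
    cases pvBRow row (term.toList.map (fun ch => String.ofList [ch])) 0 with
    | none => simpa using ih (y + 1)
    | some x => rfl

-- ===== VERDICT (by name: the statement is the Claim_ definition above) =====
theorem HorizontalScan_spec : Claim_equal_HorizontalScan := by
  intro puzzle term _ hpre
  unfold Spec_HorizontalScan HorizontalScan HorizontalScan_alt
  rcases hpre with h | h
  · subst h; rfl
  · exact pvRows_eq puzzle term h 0

theorem HorizontalScan_raises : Claim_raises_HorizontalScan := by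
  unfold Claim_raises_HorizontalScan
  constructor
  · intro puzzle term _ ⟨h1, h2⟩ hpre
    rcases hpre with h | h
    · exact h1 h
    · exact h h2
  · exact ⟨by decide, by decide, by decide⟩

-- self-check: the raises witness indeed satisfies Raises_ and B returns the stated value there
theorem pvRaisesWitness_ok : Raises_HorizontalScan pvRaiseWitness_HorizontalScan.1 pvRaiseWitness_HorizontalScan.2 ∧ HorizontalScan_alt pvRaiseWitness_HorizontalScan.1 pvRaiseWitness_HorizontalScan.2 = pvRaiseWitnessOut_HorizontalScan := HorizontalScan_raises.2.2
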